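-- pv_equiv track=rewrite | github.com/godzzn2020/SoftTeacherDrift | two_gpu_run_commands.py | _extract_output_paths
-- ===== SOURCE A (Python) =====
-- import shlex
-- from typing import Dict, List, Optional, Sequence, Tuple
--
-- def _parse_arg_tokens(command: str) -> List[str]:
--     try:
--         return shlex.split(command)
--     except Exception:
--         return command.split()
--
-- def _extract_arg_values(tokens: Sequence[str], keys: Sequence[str]) -> List[str]:
--     values: List[str] = []
--     key_set = set(keys)
--     i = 0
--     while i < len(tokens):
--         tok = tokens[i]
--         if tok.startswith("--") and "=" in tok:
--             k, v = tok.split("=", 1)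
--             if k in key_set and v.strip():
--                 values.append(v.strip())
--             i += 1
--             continue
--         if tok in key_set:
--             if i + 1 < len(tokens) and not str(tokens[i + 1]).startswith("--"):
--                 v = str(tokens[i + 1]).strip()
--                 if v:
--                     values.append(v)
--                 i += 2
--                 continue
--         i += 1
--     return values
--
-- def _extract_output_paths(command: str) -> Dict[str, str]:
--     tokens = _parse_arg_tokens(command)
--     out: Dict[str, str] = {}
--     for k in ("--log_path", "--out_csv", "--output_dir", "--log_dir"):
--         vals = _extract_arg_values(tokens, [k])
--         if vals:
--             out[k] = str(vals[0])
--     return out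
-- ===== SOURCE B (Python) =====
-- from typing import Dict, List, Optional
--
-- _KEYS = ("--log_path", "--out_csv", "--output_dir", "--log_dir")
-- _WS = " \t\r\n"
--
--
-- def _tokenize(s: str) -> Optional[List[str]]:
--     """Recursive-descent style shell tokenizer (shlex.split posix semantics,
--     whitespace_split): an outer loop skips whitespace, an inner loop builds one
--     token with dedicated sub-loops for single/double quotes and escapes.
--     Returns None exactly where shlex.split raises (unclosed quote / dangling escape)."""
--     toks: List[str] = []
--     i, n = 0, len(s)
--     while i < n:
--         if s[i] in _WS:
--             i += 1
--             continue
--         buf: List[str] = []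
--         while i < n and s[i] not in _WS:
--             c = s[i]
--             if c == "'":
--                 i += 1
--                 while True:
--                     if i >= n:
--                         return None          # no closing quotation
--                     if s[i] == "'":
--                         i += 1
--                         break
--                     buf.append(s[i])
--                     i += 1
--             elif c == '"':
--                 i += 1
--                 while True:
--                     if i >= n:
--                         return None          # no closing quotation
--                     d = s[i]
--                     if d == '"':
--                         i += 1
--                         break
--                     if d == "\\":
--                         if i + 1 >= n:
--                             return None      # no escaped character
--                         e = s[i + 1]
--                         buf.append(e if e in '\\"' else "\\" + e)
--                         i += 2
--                     else:
--                         buf.append(d)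
--                         i += 1
--             elif c == "\\":
--                 if i + 1 >= n:
--                     return None              # no escaped character
--                 buf.append(s[i + 1])
--                 i += 2
--             else:
--                 buf.append(c)
--                 i += 1
--         toks.append("".join(buf))
--     return toks
--
--
-- def _extract_output_paths(command: str) -> Dict[str, str]:
--     tokens = _tokenize(command)
--     if tokens is None:
--         tokens = command.split()
--     key_set = set(_KEYS)
--     found: Dict[str, str] = {}
--     i = 0
--     n = len(tokens)
--     while i < n:
--         tok = tokens[i]
--         if tok.startswith("--") and "=" in tok:
--             k, _, v = tok.partition("=")
--             v = v.strip()
--             if k in key_set and v and k not in found: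
--                 found[k] = v
--             i += 1
--             continue
--         if tok in key_set and i + 1 < n and not tokens[i + 1].startswith("--"):
--             v = tokens[i + 1].strip()
--             if v and tok not in found:
--                 found[tok] = v
--             i += 2
--             continue
--         i += 1
--     return {k: found[k] for k in _KEYS if k in found}
-- ===== Notes on version B (the rewrite author's own statement) =====
-- stated objective: faster
-- what changed: B replaces shlex.split by a recursive-descent shell tokenizer (a whitespace skipper with dedicated sub-loops per quote/escape mode instead of shlex's per-character stream state machine) and extracts all four keys in ONE scan with a first-match-wins dict instead of A's four separate per-key scans of the token list.
import Mathlib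
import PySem

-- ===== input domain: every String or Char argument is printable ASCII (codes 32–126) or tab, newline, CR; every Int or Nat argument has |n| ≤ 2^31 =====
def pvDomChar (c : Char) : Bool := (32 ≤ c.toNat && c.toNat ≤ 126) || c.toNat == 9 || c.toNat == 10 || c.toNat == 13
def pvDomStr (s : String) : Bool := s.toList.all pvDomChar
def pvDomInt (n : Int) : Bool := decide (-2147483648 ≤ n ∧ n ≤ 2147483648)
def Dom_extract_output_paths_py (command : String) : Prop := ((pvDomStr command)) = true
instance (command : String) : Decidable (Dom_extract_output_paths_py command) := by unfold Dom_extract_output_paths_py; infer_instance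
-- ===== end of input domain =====

-- B tokenizes with a recursive-descent lexer (instead of A's shlex state machine) and extracts
-- all four keys in ONE scan with a first-match-wins dict (instead of A's four per-key scans).

-- ===== PORT A =====

-- shlex.split(command) character state machine (posix mode, whitespace_split), hand-ported
-- exactly on the printable-ASCII + tab/newline/CR domain; `none` is exactly where CPython's
-- shlex raises ValueError.
inductive ShSt
  | space | word | squote | dquote | escWord | escDquote
deriving DecidableEq, Repr

def shWs (c : Char) : Bool := c = ' ' || c = '\t' || c = '\r' || c = '\n'

def shStep (a : List String × List Char × Bool × ShSt) (c : Char) :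
    List String × List Char × Bool × ShSt :=
  let (out, token, quoted, st) := a
  match st with
  | .space =>
    if shWs c then
      if token ≠ [] ∨ quoted then (out ++ [String.ofList token], [], false, .space)
      else (out, token, quoted, .space)
    else if c = '\'' then (out, token, true, .squote)
    else if c = '"' then (out, token, true, .dquote)
    else if c = '\\' then (out, token, quoted, .escWord)
    else (out, token ++ [c], quoted, .word)
  | .word =>
    if shWs c then
      if token ≠ [] ∨ quoted then (out ++ [String.ofList token], [], false, .space)
      else (out, token, quoted, .space)
    else if c = '\'' then (out, token, true, .squote)
    else if c = '"' then (out, token, true, .dquote)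
    else if c = '\\' then (out, token, quoted, .escWord)
    else (out, token ++ [c], quoted, .word)
  | .squote =>
    if c = '\'' then (out, token, quoted, .word)
    else (out, token ++ [c], quoted, .squote)
  | .dquote =>
    if c = '"' then (out, token, quoted, .word)
    else if c = '\\' then (out, token, quoted, .escDquote)
    else (out, token ++ [c], quoted, .dquote)
  | .escWord => (out, token ++ [c], quoted, .word)
  | .escDquote =>
    if c = '\\' ∨ c = '"' then (out, token ++ [c], quoted, .dquote)
    else (out, token ++ ['\\', c], quoted, .dquote)

-- final flush: emit the pending token; quote/escape states = shlex's ValueError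
def shFin (r : List String × List Char × Bool × ShSt) : Option (List String) :=
  match r with
  | (out, token, quoted, st) =>
    match st with
    | .squote | .dquote | .escWord | .escDquote => none
    | _ => if token ≠ [] ∨ quoted then some (out ++ [String.ofList token]) else some out

def pyShlexSplit? (s : String) : Option (List String) :=
  shFin (s.toList.foldl shStep ([], [], false, ShSt.space))

-- _parse_arg_tokens: shlex.split, on exception command.split()
def parse_arg_tokens (command : String) : List String :=
  match pyShlexSplit? command with
  | some toks => toks
  | none => PySem.Str.split₀ command

def outputKeys : List String := ["--log_path", "--out_csv", "--output_dir", "--log_dir"]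

-- _extract_arg_values: the while loop, recursing on the token list (i+=1 / i+=2 = consume 1 / 2)
def extractArgValues : List String → List String → List String
  | [], _keys => []
  | tok :: rest, keys =>
    if PySem.Str.startswith tok "--" && PySem.Str.isIn "=" tok then
      let parts := (PySem.Str.splitMax? tok "=" 1).getD []
      let k := parts.getD 0 ""
      let v := PySem.Str.strip (parts.getD 1 "")
      (if k ∈ keys ∧ v ≠ "" then [v] else []) ++ extractArgValues rest keys
    else if tok ∈ keys then
      match rest with
      | next :: rest2 =>
        if PySem.Str.startswith next "--" = false then
          let v := PySem.Str.strip next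
          (if v ≠ "" then [v] else []) ++ extractArgValues rest2 keys
        else extractArgValues (next :: rest2) keys
      | [] => extractArgValues [] keys
    else extractArgValues rest keys

def extract_output_paths_py (command : String) : List (String × String) :=
  let tokens := parse_arg_tokens command
  (outputKeys.foldl (fun out k =>
      let vals := extractArgValues tokens [k]
      if vals.isEmpty then out else out.insert k (PySem.List.pyGetD vals 0 ""))
    (PySem.Dict.empty : PySem.Dict String String)).items

-- ===== PORT B =====

def wsB (c : Char) : Bool := c = ' ' || c = '\t' || c = '\r' || c = '\n'

-- recursive-descent tokenizer (_tokenize in Source B): skip whitespace (lexWs), build one token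
-- (lexNext/lexTok) with dedicated sub-loops for single quotes (lexSQ), double quotes (lexDQ)
-- and escapes; `none` exactly where Source B returns None (unclosed quote / dangling escape)
mutual
def lexWs : List Char → Option (List String)
  | [] => some []
  | c :: cs => if wsB c then lexWs cs else lexTok c cs [] false
termination_by cs => 3 * cs.length
decreasing_by all_goals (try simp only [List.length_cons]); omega

def lexTok : Char → List Char → List Char → Bool → Option (List String)
  | c, cs, acc, q =>
    if wsB c then (lexWs cs).map (String.ofList acc :: ·)
    else if c = '\'' then lexSQ cs acc
    else if c = '"' then lexDQ cs acc
    else if c = '\\' then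
      match cs with
      | [] => none
      | d :: ds => lexNext ds (acc ++ [d]) q
    else lexNext cs (acc ++ [c]) q
termination_by c cs acc q => 3 * cs.length + 2
decreasing_by all_goals (try simp only [List.length_cons]); omega

def lexNext : List Char → List Char → Bool → Option (List String)
  | [], acc, _ => some [String.ofList acc]
  | c :: cs, acc, q => lexTok c cs acc q
termination_by cs acc q => 3 * cs.length + 1
decreasing_by all_goals (try simp only [List.length_cons]); omega

def lexSQ : List Char → List Char → Option (List String)
  | [], _ => none
  | c :: cs, acc => if c = '\'' then lexNext cs acc true else lexSQ cs (acc ++ [c])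
termination_by cs acc => 3 * cs.length + 1
decreasing_by all_goals (try simp only [List.length_cons]); omega

def lexDQ : List Char → List Char → Option (List String)
  | [], _ => none
  | c :: cs, acc =>
    if c = '"' then lexNext cs acc true
    else if c = '\\' then
      match cs with
      | [] => none
      | d :: ds => lexDQ ds (acc ++ (if d = '\\' ∨ d = '"' then [d] else ['\\', d]))
    else lexDQ cs (acc ++ [c])
termination_by cs acc => 3 * cs.length + 1
decreasing_by all_goals (try simp only [List.length_cons]); omega
end

def parse_tokens_b (command : String) : List String :=
  match lexWs command.toList with
  | some toks => toks
  | none => PySem.Str.split₀ command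

-- single pass over the tokens, first-match-wins dict `found`
def scanTokens : List String → PySem.Dict String String → PySem.Dict String String
  | [], found => found
  | tok :: rest, found =>
    if PySem.Str.startswith tok "--" && PySem.Str.isIn "=" tok then
      let parts := (PySem.Str.splitMax? tok "=" 1).getD []   -- tok.partition("="); "=" is present here
      let k := parts.getD 0 ""
      let v := PySem.Str.strip (parts.getD 1 "")
      scanTokens rest
        (if k ∈ outputKeys ∧ v ≠ "" ∧ found.contains k = false then found.insert k v else found)
    else
      match rest with
      | next :: rest2 =>
        if tok ∈ outputKeys ∧ PySem.Str.startswith next "--" = false then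
          let v := PySem.Str.strip next
          scanTokens rest2
            (if v ≠ "" ∧ found.contains tok = false then found.insert tok v else found)
        else scanTokens (next :: rest2) found
      | [] => found

def extract_output_paths_py_alt (command : String) : List (String × String) :=
  let tokens := parse_tokens_b command
  let found := scanTokens tokens PySem.Dict.empty
  (outputKeys.foldl (fun out k =>
      if found.contains k then out.insert k (found.getD k "") else out)
    (PySem.Dict.empty : PySem.Dict String String)).items

-- ===== PRECONDITION & SPEC =====
def Spec_extract_output_paths_py (command : String) (out : List (String × String)) : Prop := out = extract_output_paths_py_alt command
instance (command : String) (out : List (String × String)) : Decidable (Spec_extract_output_paths_py command out) := by unfold Spec_extract_output_paths_py; infer_instance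

-- ===== CLAIM (what is proved, stated in full; the proofs are below) =====
def Claim_equal_extract_output_paths_py : Prop := ∀ (command : String), Dom_extract_output_paths_py command → Spec_extract_output_paths_py command (extract_output_paths_py command)

-- ===== LEMMAS AND PROOFS =====

-- ---- tokenizer agreement: A's foldl state machine = B's recursive-descent lexer ----

-- the six per-state correspondences, proved simultaneously
def LexConj (cs : List Char) : Prop :=
    (∀ out : List String,
        shFin (cs.foldl shStep (out, [], false, .space)) = (lexWs cs).map (out ++ ·)) ∧
    (∀ (out : List String) (token : List Char) (q : Bool), (token ≠ [] ∨ q = true) →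
        shFin (cs.foldl shStep (out, token, q, .word)) = (lexNext cs token q).map (out ++ ·)) ∧
    (∀ (out : List String) (token : List Char),
        shFin (cs.foldl shStep (out, token, true, .squote)) = (lexSQ cs token).map (out ++ ·)) ∧
    (∀ (out : List String) (token : List Char),
        shFin (cs.foldl shStep (out, token, true, .dquote)) = (lexDQ cs token).map (out ++ ·)) ∧
    (∀ (out : List String) (token : List Char) (q : Bool),
        shFin (cs.foldl shStep (out, token, q, .escWord)) =
          (match cs with
           | [] => none
           | d :: ds => (lexNext ds (token ++ [d]) q).map (out ++ ·))) ∧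
    (∀ (out : List String) (token : List Char),
        shFin (cs.foldl shStep (out, token, true, .escDquote)) =
          (match cs with
           | [] => none
           | d :: ds =>
             (lexDQ ds (token ++ (if d = '\\' ∨ d = '"' then [d] else ['\\', d]))).map
               (out ++ ·)))

theorem lexNil : LexConj [] := by
  unfold LexConj
  refine ⟨?_, ?_, ?_, ?_, ?_, ?_⟩
  · intro out; simp [shFin, lexWs]
  · intro out token q h
    rcases h with h | h <;> simp [shFin, lexNext, h]
  · intro out token; simp [shFin, lexSQ]
  · intro out token; simp [shFin, lexDQ]
  · intro out token q; simp [shFin]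
  · intro out token; simp [shFin]

theorem lexAgree : ∀ (n : Nat) (cs : List Char), cs.length ≤ n → LexConj cs := by
  intro n
  induction n with
  | zero =>
      intro cs hl
      have h0 : cs = [] := List.length_eq_zero_iff.mp (Nat.le_zero.mp hl)
      rw [h0]; exact lexNil
  | succ m ih =>
      intro cs hl
      cases cs with
      | nil => exact lexNil
      | cons c cs' =>
        have h' : cs'.length ≤ m := by simp at hl; omega
        obtain ⟨I1, I2, I3, I4, I5, I6⟩ := ih cs' h'
        have hw_or := Bool.eq_false_or_eq_true (shWs c)
        unfold LexConj
        refine ⟨?_, ?_, ?_, ?_, ?_, ?_⟩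
        · -- space state
          intro out
          rw [List.foldl_cons]
          by_cases hw : shWs c = true
          · have hwB : wsB c = true := hw
            simp only [shStep, hw, if_true]
            rw [lexWs]
            simp only [hwB, if_true]
            simp only [ne_eq, not_true_eq_false]
            exact I1 out
          · have hwB : wsB c = false := by simpa using hw
            rw [lexWs]
            simp only [hwB, Bool.false_eq_true, if_false]
            rw [lexTok.eq_def]
            simp only [hwB, Bool.false_eq_true, if_false]
            by_cases hq1 : c = '\''
            · simp only [shStep, Bool.false_eq_true, hq1, if_true]
              exact I3 out []
            · simp only [shStep, hw, Bool.false_eq_true, if_false, if_neg hq1]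
              by_cases hq2 : c = '"'
              · simp only [hq2, if_true]
                exact I4 out []
              · simp only [if_neg hq2]
                by_cases hq3 : c = '\\'
                · simp only [hq3, if_true]
                  rw [I5 out [] false]
                  cases cs' <;> simp
                · simp only [if_neg hq3]
                  rw [I2 out ([] ++ [c]) false (Or.inl (by simp))]
        · -- word state
          intro out token q h
          rw [List.foldl_cons]
          rw [lexNext, lexTok.eq_def]
          by_cases hw : shWs c = true
          · have hwB : wsB c = true := hw
            simp only [shStep, hw, if_true, hwB]
            rw [if_pos h]
            rw [I1 (out ++ [String.ofList token])]
            cases lexWs cs' <;> simp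
          · have hwB : wsB c = false := by simpa using hw
            simp only [shStep, hw, hwB, Bool.false_eq_true, if_false]
            by_cases hq1 : c = '\''
            · simp only [hq1, if_true]
              exact I3 out token
            · simp only [if_neg hq1]
              by_cases hq2 : c = '"'
              · simp only [hq2, if_true]
                exact I4 out token
              · simp only [if_neg hq2]
                by_cases hq3 : c = '\\'
                · simp only [hq3, if_true]
                  rw [I5 out token q]
                  cases cs' <;> simp
                · simp only [if_neg hq3]
                  exact I2 out (token ++ [c]) q (Or.inl (by simp))
        · -- squote state
          intro out token
          rw [List.foldl_cons, lexSQ]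
          by_cases hq : c = '\''
          · simp only [shStep, hq, if_true]
            exact I2 out token true (Or.inr rfl)
          · simp only [shStep, if_neg hq]
            exact I3 out (token ++ [c])
        · -- dquote state
          intro out token
          rw [List.foldl_cons, lexDQ.eq_def]
          by_cases hq : c = '"'
          · simp only [shStep, hq, if_true]
            exact I2 out token true (Or.inr rfl)
          · simp only [shStep, if_neg hq]
            by_cases hb : c = '\\'
            · simp only [hb, if_true]
              rw [I6 out token]
              cases cs' <;> simp
            · simp only [if_neg hb]
              exact I4 out (token ++ [c])
        · -- escWord state
          intro out token q
          rw [List.foldl_cons]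
          simp only [shStep]
          rw [I2 out (token ++ [c]) q (Or.inl (by simp))]
        · -- escDquote state
          intro out token
          rw [List.foldl_cons]
          by_cases hc : c = '\\' ∨ c = '"'
          · simp only [shStep, if_pos hc]
            rw [I4 out (token ++ [c])]
          · simp only [shStep, if_neg hc]
            rw [I4 out (token ++ ['\\', c])]

theorem pyShlex_eq_lex (s : String) : pyShlexSplit? s = lexWs s.toList := by
  have h := (lexAgree s.toList.length s.toList le_rfl).1 []
  unfold pyShlexSplit?
  rw [h]
  cases lexWs s.toList <;> simp

theorem parse_eq (command : String) : parse_arg_tokens command = parse_tokens_b command := by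
  unfold parse_arg_tokens parse_tokens_b
  rw [pyShlex_eq_lex]

-- ---- extraction agreement: four per-key scans = one first-match-wins scan ----

theorem key_startswith (k : String) (hk : k ∈ outputKeys) :
    PySem.Str.startswith k "--" = true := by
  fin_cases hk <;> decide

theorem head?_guard_append (c : Prop) [Decidable c] (v : String) (t : List String) :
    ((if c then [v] else []) ++ t).head? = Option.or (if c then some v else none) t.head? := by
  split <;> simp

theorem or_ins (found : PySem.Dict String String) (kk v k : String) (hk : k ∈ outputKeys)
    (r : Option String) :
    ((if kk ∈ outputKeys ∧ v ≠ "" ∧ found.contains kk = false then found.insert kk v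
        else found).get? k).or r
      = (found.get? k).or ((if kk = k ∧ v ≠ "" then some v else none).or r) := by
  by_cases hkk : kk = k
  · subst hkk
    by_cases hv : v = ""
    · have c1 : ¬(kk ∈ outputKeys ∧ v ≠ "" ∧ found.contains kk = false) := by simp [hv]
      have c2 : ¬(kk = kk ∧ v ≠ "") := by simp [hv]
      rw [if_neg c1, if_neg c2]
      simp
    · by_cases hc : found.contains kk = false
      · rw [if_pos ⟨hk, hv, hc⟩, if_pos ⟨rfl, hv⟩, PySem.Dict.get?_insert_self,
          (PySem.Dict.get?_eq_none_iff_contains found kk).mpr hc]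
        simp
      · have c1 : ¬(kk ∈ outputKeys ∧ v ≠ "" ∧ found.contains kk = false) := by
          intro h; exact hc h.2.2
        rw [if_neg c1, if_pos ⟨rfl, hv⟩]
        obtain ⟨w, hw⟩ := Option.isSome_iff_exists.mp
          (by rw [← PySem.Dict.contains_eq_isSome_get? found kk]; simpa using hc)
        rw [hw]
        simp
  · have hnone : (if kk = k ∧ v ≠ "" then some v else none) = none := by simp [hkk]
    have hget : (if kk ∈ outputKeys ∧ v ≠ "" ∧ found.contains kk = false then found.insert kk v
        else found).get? k = found.get? k := by
      split
      · exact PySem.Dict.get?_insert_of_ne _ _ (Ne.symm hkk)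
      · rfl
    rw [hnone, hget]
    simp

theorem scan_get (k : String) (hk : k ∈ outputKeys) :
    ∀ (ts : List String) (found : PySem.Dict String String),
      (scanTokens ts found).get? k = (found.get? k).or (extractArgValues ts [k]).head? := by
  intro ts found
  induction ts, found using scanTokens.induct with
  | case1 found => simp [scanTokens, extractArgValues]
  | case2 tok rest found cond parts kk v ih =>
      rw [scanTokens.eq_def, extractArgValues.eq_def]
      simp only [cond, if_true, List.mem_singleton]
      show (scanTokens rest (if kk ∈ outputKeys ∧ v ≠ "" ∧ found.contains kk = false then
          found.insert kk v else found)).get? k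
        = (found.get? k).or ((if kk = k ∧ v ≠ "" then [v] else []) ++
            extractArgValues rest [k]).head?
      rw [ih, head?_guard_append]
      exact or_ins found kk v k hk _
  | case3 tok found ncond next rest2 g v ih =>
      obtain ⟨g1, g2⟩ := g
      have hv' : PySem.Str.strip next = v := rfl
      rw [scanTokens.eq_def]
      simp only [ncond, Bool.false_eq_true, if_false, if_pos (And.intro g1 g2)]
      rw [hv', ih]
      by_cases htk : tok = k
      · have hA : extractArgValues (tok :: next :: rest2) [k]
            = (if v ≠ "" then [v] else []) ++ extractArgValues rest2 [k] := by
          rw [extractArgValues.eq_def]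
          simp only [ncond, Bool.false_eq_true, if_false, List.mem_singleton,
            if_pos htk, if_pos g2]
          rw [hv']
        have e1 : (if v ≠ "" ∧ found.contains tok = false then found.insert tok v else found)
            = (if tok ∈ outputKeys ∧ v ≠ "" ∧ found.contains tok = false then
                found.insert tok v else found) := by
          simp [g1]
        have e2 : (if v ≠ "" then some v else none)
            = (if tok = k ∧ v ≠ "" then some v else none) := by
          simp [htk]
        rw [hA, head?_guard_append, e1, e2]
        exact or_ins found tok v k hk _
      · have hnk : next ≠ k := by
          intro h
          rw [h, key_startswith k hk] at g2
          exact Bool.true_eq_false.mp g2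
        have hA : extractArgValues (tok :: next :: rest2) [k] = extractArgValues rest2 [k] := by
          rw [extractArgValues.eq_def]
          simp only [ncond, Bool.false_eq_true, if_false, List.mem_singleton, if_neg htk]
          rw [extractArgValues.eq_def]
          simp only [g2, Bool.false_and, Bool.false_eq_true, if_false, List.mem_singleton,
            if_neg hnk]
        rw [hA]
        have hget : (if v ≠ "" ∧ found.contains tok = false then found.insert tok v
            else found).get? k = found.get? k := by
          split
          · exact PySem.Dict.get?_insert_of_ne _ _ (Ne.symm htk)
          · rfl
        rw [hget]
  | case4 tok found ncond next rest2 g ih =>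
      rw [scanTokens.eq_def]
      simp only [ncond, Bool.false_eq_true, if_false, if_neg g]
      rw [ih]
      have hA : extractArgValues (tok :: next :: rest2) [k]
          = extractArgValues (next :: rest2) [k] := by
        rw [extractArgValues.eq_def]
        by_cases htk : tok = k
        · have hsw : ¬ PySem.Str.startswith next "--" = false := fun h => g ⟨htk ▸ hk, h⟩
          simp only [ncond, Bool.false_eq_true, if_false, List.mem_singleton, if_pos htk,
            if_neg hsw]
        · simp only [ncond, Bool.false_eq_true, if_false, List.mem_singleton, if_neg htk]
      rw [hA]
  | case5 tok found ncond =>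
      rw [scanTokens.eq_def, extractArgValues.eq_def]
      simp only [ncond, Bool.false_eq_true, if_false, List.mem_singleton]
      split <;> simp [extractArgValues]

theorem step_eq (ts : List String) (k : String) (hk : k ∈ outputKeys)
    (out : PySem.Dict String String) :
    (let vals := extractArgValues ts [k]
     if vals.isEmpty then out else out.insert k (PySem.List.pyGetD vals 0 "")) =
    (if (scanTokens ts PySem.Dict.empty).contains k then
        out.insert k ((scanTokens ts PySem.Dict.empty).getD k "")
      else out) := by
  have h := scan_get k hk ts PySem.Dict.empty
  rw [PySem.Dict.get?_empty] at h
  simp only [Option.or] at h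
  cases hv : extractArgValues ts [k] with
  | nil =>
      rw [hv] at h
      simp only [List.head?] at h
      rw [PySem.Dict.contains_eq_isSome_get?, h]
      simp
  | cons v rest =>
      rw [hv] at h
      simp only [List.head?] at h
      rw [PySem.Dict.contains_eq_isSome_get?, h]
      simp [PySem.Dict.getD_eq_get?_getD, h]

-- ===== VERDICT (by name: the statement is the Claim_ definition above) =====
theorem extract_output_paths_py_spec : Claim_equal_extract_output_paths_py := by
  intro command _
  unfold Spec_extract_output_paths_py extract_output_paths_py extract_output_paths_py_alt
  rw [parse_eq]
  refine congrArg PySem.Dict.items ?_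
  apply PySem.List.foldl_congr_mem
  intro out k hk
  exact step_eq (parse_tokens_b command) k hk out
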